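-- pv_equiv track=rewrite | github.com/2UJ1N/Algorithm | 프로그래머스/2/138476. 귤 고르기/귤 고르기.py | solution
-- ===== SOURCE A (Python) =====
-- from collections import Counter
--
-- def solution(k, tangerine):
--     cntTan = Counter(tangerine)
--
--     cntT = list(cntTan.values())
--     recntT = sorted(cntT, reverse = True)
--
--
--     if max(cntT) >= k: return 1
--     elif sum(cntT) == k: return len(cntT)
--     else:
--         tmp = recntT[0]
--         for i in range(1, len(recntT)):
--             tmp += recntT[i]
--             if tmp >= k:
--                 return i + 1
-- ===== SOURCE B (Python) =====
-- from collections import Counter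
--
--
-- def solution(k, tangerine):
--     # counting-sort style: bucket the group sizes with a second Counter and
--     # walk sizes from the largest down, instead of sorting the counts.
--     counts = Counter(tangerine)
--     m = max(counts.values())
--     size_freq = Counter(counts.values())
--     total = 0
--     groups = 0
--     for c in range(m, 0, -1):
--         for _ in range(size_freq[c]):
--             total += c
--             groups += 1
--             if total >= k:
--                 return groups
-- ===== Notes on version B (the rewrite author's own statement) =====
-- stated objective: alternative
-- what changed: Replaces A's comparison sort of the group sizes plus a three-branch greedy (max / sum / cumulative loop) by a counting-sort-style pass: a second Counter buckets the group sizes and one descending range(m,0,-1) walk accumulates groups until k is reached.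
-- outside the precondition, e.g. on solution(5, [1, 1]): A returns None, B returns None; on solution(1, []): A raises ValueError, B raises ValueError
import Mathlib
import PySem

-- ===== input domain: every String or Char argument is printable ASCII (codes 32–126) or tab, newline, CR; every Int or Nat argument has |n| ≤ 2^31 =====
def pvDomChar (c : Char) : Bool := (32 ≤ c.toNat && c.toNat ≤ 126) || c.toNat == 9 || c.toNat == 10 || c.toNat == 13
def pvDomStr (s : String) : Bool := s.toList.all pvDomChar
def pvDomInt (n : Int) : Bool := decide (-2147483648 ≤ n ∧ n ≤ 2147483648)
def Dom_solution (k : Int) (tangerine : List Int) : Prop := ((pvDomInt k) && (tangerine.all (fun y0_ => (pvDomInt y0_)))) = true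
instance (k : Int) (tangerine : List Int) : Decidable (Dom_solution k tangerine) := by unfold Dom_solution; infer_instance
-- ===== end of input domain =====

-- B replaces A's comparison sort of the group sizes + three-branch greedy by a counting-sort-style
-- bucket walk (a second Counter over the sizes, scanned from the largest size down); alternative, same result.

-- ===== PORT A =====
-- 'for i in range(1, len(recntT)): tmp += recntT[i]; if tmp >= k: return i + 1'
-- (the index i is always in range here, so pyGetD with default 0 is exact; falling off the loop
--  is Python's implicit None — those inputs are outside Pre_solution, the port returns 0 there)
def solAGo (k : Int) (recntT : List Int) (tmp : Int) : List Int → Int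
  | [] => 0
  | i :: rest =>
    let tmp2 := tmp + PySem.List.pyGetD recntT i 0
    if k ≤ tmp2 then i + 1 else solAGo k recntT tmp2 rest

def solution (k : Int) (tangerine : List Int) : Int :=
  let cntTan := PySem.Dict.counter tangerine
  let cntT := cntTan.values
  let recntT := PySem.List.sorted cntT (fun x => x) true
  match PySem.List.max? cntT (fun x => x) with
  | none => 0  -- Python: max([]) raises ValueError; outside Pre_solution
  | some mx =>
    if k ≤ mx then 1
    else if cntT.sum = k then (cntT.length : Int)
    else solAGo k recntT (PySem.List.pyGetD recntT 0 0) (PySem.List.pyRange 1 (recntT.length : Int))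

-- ===== PORT B =====
-- inner 'for _ in range(size_freq[c]): total += c; groups += 1; if total >= k: return groups'
-- (first component 'some groups' signals the early return)
def altInner (k c : Int) : Nat → Int → Int → Option Int × Int × Int
  | 0, total, groups => (none, total, groups)
  | n + 1, total, groups =>
    let total2 := total + c
    let groups2 := groups + 1
    if k ≤ total2 then (some groups2, total2, groups2)
    else altInner k c n total2 groups2

-- outer 'for c in range(m, 0, -1)'; falling off both loops is Python's implicit None
-- (outside Pre_solution, the port returns 0 there)
def altOuter (k : Int) (sizeFreq : PySem.Dict Int Int) : List Int → Int → Int → Int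
  | [], _, _ => 0
  | c :: rest, total, groups =>
    match altInner k c (sizeFreq.getD c 0).toNat total groups with
    | (some g, _, _) => g
    | (none, total2, groups2) => altOuter k sizeFreq rest total2 groups2

def solution_alt (k : Int) (tangerine : List Int) : Int :=
  let counts := PySem.Dict.counter tangerine
  match PySem.List.max? counts.values (fun x => x) with
  | none => 0  -- Python: max([]) raises ValueError; outside Pre_solution
  | some m =>
    let sizeFreq := PySem.Dict.counter counts.values
    altOuter k sizeFreq (PySem.List.pyRange m 0 (-1)) 0 0

-- ===== PRECONDITION & SPEC =====
-- Pre_ excludes exactly the inputs on which Python's A does not return an int: the empty list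
-- (max([]) raises ValueError) and k > len(tangerine) (= the total number of tangerines, where
-- A falls off its loop and returns None).
def Pre_solution (k : Int) (tangerine : List Int) : Prop :=
  tangerine ≠ [] ∧ k ≤ (tangerine.length : Int)
instance (k : Int) (tangerine : List Int) : Decidable (Pre_solution k tangerine) := by
  unfold Pre_solution; infer_instance

def pvWitness_solution : Int × List Int := (2, [1, 1, 2])

def Spec_solution (k : Int) (tangerine : List Int) (out : Int) : Prop := out = solution_alt k tangerine
instance (k : Int) (tangerine : List Int) (out : Int) : Decidable (Spec_solution k tangerine out) := by
  unfold Spec_solution; infer_instance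

-- ===== CLAIM (what is proved, stated in full; the proofs are below) =====
def Claim_equal_solution : Prop := ∀ (k : Int) (tangerine : List Int), Dom_solution k tangerine → Pre_solution k tangerine → Spec_solution k tangerine (solution k tangerine)

-- ===== LEMMAS AND PROOFS =====

-- the common greedy: scan a list of group sizes, accumulating total and group count,
-- returning the count as soon as total ≥ k (0 when the list is exhausted)
def scanCover (k : Int) : Int → Int → List Int → Int
  | _, _, [] => 0
  | total, groups, x :: rest =>
    if k ≤ total + x then groups + 1 else scanCover k (total + x) (groups + 1) rest

theorem pyRange_empty_of_le {a b : Int} (h : b ≤ a) : PySem.List.pyRange a b = [] := by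
  rw [PySem.List.pyRange_of_pos a b one_pos]
  simp [show ¬ a < b by omega]

theorem solAGo_eq_scan (k : Int) (s : List Int) :
    ∀ (n i : Nat) (tmp : Int), i + n = s.length →
      solAGo k s tmp (PySem.List.pyRange (i : Int) (s.length : Int)) =
        scanCover k tmp (i : Int) (s.drop i) := by
  intro n
  induction n with
  | zero =>
    intro i tmp h
    rw [pyRange_empty_of_le (by omega), List.drop_of_length_le (by omega)]
    rfl
  | succ n ih =>
    intro i tmp h
    have hi : i < s.length := by omega
    rw [PySem.List.pyRange_one_cons (by exact_mod_cast hi)]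
    rw [List.drop_eq_getElem_cons hi]
    simp only [solAGo, scanCover, PySem.List.pyGetD_natCast, List.getD_eq_getElem?_getD,
      List.getElem?_eq_getElem hi, Option.getD_some]
    split
    · rfl
    · have := ih (i + 1) (tmp + s[i]) (by omega)
      push_cast at this ⊢
      exact this

theorem scan_all (k : Int) :
    ∀ (l : List Int) (total groups : Int), l ≠ [] → (∀ x ∈ l, 1 ≤ x) →
      total + l.sum = k → scanCover k total groups l = groups + (l.length : Int) := by
  intro l
  induction l with
  | nil => intro _ _ h; exact absurd rfl h
  | cons x rest ih =>
    intro total groups _ hpos hsum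
    simp only [scanCover]
    rcases List.eq_nil_or_concat' rest with hr | ⟨y, t, hr⟩
    · subst hr
      simp only [List.sum_cons, List.sum_nil, add_zero] at hsum
      simp [show k ≤ total + x by omega]
    · have hrest_ne : rest ≠ [] := by subst hr; simp
      have hrest_pos : 1 ≤ rest.sum := by
        have : ∀ r : List Int, r ≠ [] → (∀ x ∈ r, 1 ≤ x) → 1 ≤ r.sum := by
          intro r hne hp
          cases r with
          | nil => exact absurd rfl hne
          | cons a t =>
            have h1 : 1 ≤ a := hp a (by simp)
            have h2 : 0 ≤ t.sum := List.sum_nonneg (fun x hx => by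
              have := hp x (by simp [hx]); omega)
            simp only [List.sum_cons]; omega
        exact this rest hrest_ne (fun x hx => hpos x (by simp [hx]))
      have hlt : ¬ k ≤ total + x := by
        simp only [List.sum_cons] at hsum; omega
      rw [if_neg hlt, ih (total + x) (groups + 1) hrest_ne
        (fun z hz => hpos z (by simp [hz])) (by simp only [List.sum_cons] at hsum; omega)]
      simp only [List.length_cons]
      push_cast
      ring

theorem altInner_eq_scan (k c : Int) :
    ∀ (n : Nat) (total groups : Int) (rest : List Int),
      (match altInner k c n total groups with
       | (some g, _, _) => g
       | (none, t2, g2) => scanCover k t2 g2 rest) =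
      scanCover k total groups (List.replicate n c ++ rest) := by
  intro n
  induction n with
  | zero => intro total groups rest; rfl
  | succ n ih =>
    intro total groups rest
    rw [List.replicate_succ, List.cons_append]
    by_cases h : k ≤ total + c
    · simp [altInner, scanCover, h]
    · simp only [altInner, scanCover, if_neg h]
      exact ih (total + c) (groups + 1) rest

theorem altOuter_eq_scan (k : Int) (d : PySem.Dict Int Int) :
    ∀ (cl : List Int) (total groups : Int),
      altOuter k d cl total groups =
        scanCover k total groups (cl.flatMap fun c => List.replicate (d.getD c 0).toNat c) := by
  intro cl
  induction cl with
  | nil => intro total groups; rfl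
  | cons c rest ih =>
    intro total groups
    rw [List.flatMap_cons]
    rw [← altInner_eq_scan k c (d.getD c 0).toNat total groups]
    simp only [altOuter]
    rcases h : altInner k c (d.getD c 0).toNat total groups with ⟨g?, t2, g2⟩
    cases g? with
    | some g => rfl
    | none => exact ih t2 g2

theorem pyRange_desc (m : Int) :
    PySem.List.pyRange m 0 (-1) = List.map (fun j : Nat => m - (j : Int)) (List.range m.toNat) := by
  simp only [PySem.List.pyRange, show ¬((-1 : Int) = 0) by norm_num, if_false,
    show ¬((0 : Int) < -1) by norm_num]
  by_cases hm : (0 : Int) < m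
  · rw [if_pos hm]
    have h2 : ((m - 0 + -(-1) - 1) / -(-1)) = m := by norm_num
    rw [h2]
    apply List.map_congr_left
    intro j _
    ring
  · rw [if_neg hm]
    have h0 : m.toNat = 0 := by omega
    simp [h0]

theorem mem_pyRange_desc (m v : Int) : v ∈ PySem.List.pyRange m 0 (-1) ↔ 1 ≤ v ∧ v ≤ m := by
  rw [pyRange_desc]
  simp only [List.mem_map, List.mem_range]

  constructor
  · rintro ⟨j, hj, rfl⟩; omega
  · intro h; exact ⟨(m - v).toNat, by omega, by omega⟩

theorem nodup_pyRange_desc (m : Int) : (PySem.List.pyRange m 0 (-1)).Nodup := by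
  rw [pyRange_desc]
  refine List.Nodup.map ?_ List.nodup_range
  intro a b h
  dsimp only at h
  omega

theorem pairwise_gt_pyRange_desc (m : Int) :
    (PySem.List.pyRange m 0 (-1)).Pairwise (fun a b => b < a) := by
  rw [pyRange_desc]
  rw [List.pairwise_map]
  exact List.pairwise_lt_range.imp (fun h => by omega)

theorem sum_map_ite_count (v : Int) (cs : List Int) :
    ∀ (l : List Int), l.Nodup →
      (l.map (fun c => if c = v then cs.count c else 0)).sum = if v ∈ l then cs.count v else 0 := by
  intro l
  induction l with
  | nil => simp
  | cons c rest ih =>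
    intro hnd
    rcases List.nodup_cons.mp hnd with ⟨hcmem, hnd'⟩
    simp only [List.map_cons, List.sum_cons, ih hnd', List.mem_cons]
    by_cases hcv : c = v
    · subst hcv
      simp [hcmem]
    · simp [hcv, Ne.symm hcv]

theorem T_perm (cs : List Int) (m : Int) (hub : ∀ x ∈ cs, x ≤ m) (hpos : ∀ x ∈ cs, 1 ≤ x) :
    ((PySem.List.pyRange m 0 (-1)).flatMap fun c => List.replicate (cs.count c) c).Perm cs := by
  rw [List.perm_iff_count]
  intro v
  rw [List.count_flatMap]
  have : ((PySem.List.pyRange m 0 (-1)).map (List.count v ∘ fun c => List.replicate (cs.count c) c))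
      = ((PySem.List.pyRange m 0 (-1)).map (fun c => if c = v then cs.count c else 0)) := by
    apply List.map_congr_left
    intro c _
    simp only [Function.comp_apply, List.count_replicate, beq_iff_eq]
  rw [this, sum_map_ite_count v cs _ (nodup_pyRange_desc m)]
  by_cases hv : v ∈ PySem.List.pyRange m 0 (-1)
  · simp [hv]
  · rw [if_neg hv]
    have : v ∉ cs := fun hmem =>
      hv ((mem_pyRange_desc m v).mpr ⟨hpos v hmem, hub v hmem⟩)
    simp [List.count_eq_zero.mpr this]

theorem T_pairwise (cs : List Int) (m : Int) :
    ((PySem.List.pyRange m 0 (-1)).flatMap fun c => List.replicate (cs.count c) c).Pairwise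
      (fun a b => b ≤ a) := by
  rw [List.pairwise_flatMap]
  constructor
  · intro c _
    rw [List.pairwise_replicate]
    right; exact le_refl c
  · apply (pairwise_gt_pyRange_desc m).imp
    intro c1 c2 h x hx y hy
    rw [List.eq_of_mem_replicate hx, List.eq_of_mem_replicate hy]
    omega

theorem sorted_desc_eq (cs ys : List Int) (hperm : ys.Perm cs)
    (hpw : ys.Pairwise (fun a b => b ≤ a)) :
    PySem.List.sorted cs (fun x => x) true = ys := by
  apply List.Perm.eq_of_pairwise (le := fun a b => b ≤ a)
  · intro a b _ _ h1 h2; omega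
  · exact PySem.List.sorted_pairwise_rev cs (fun x => x)
  · exact hpw
  · exact (PySem.List.sorted_perm cs (fun x => x) true).trans hperm.symm

theorem values_counter_pos (t : List Int) :
    ∀ x ∈ (PySem.Dict.counter t).values, 1 ≤ x := by
  intro x hx
  rw [PySem.Dict.values_eq_map_keys _ (PySem.Dict.nodup_keys_counter t) 0] at hx
  rcases List.mem_map.mp hx with ⟨v, hv, rfl⟩
  rw [PySem.Dict.keys_counter, PySem.Set.mem_ofList] at hv
  rw [PySem.Dict.getD_counter]
  have : 0 < t.count v := List.count_pos_iff.mpr hv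
  omega

theorem values_counter_ne_nil (t : List Int) (h : t ≠ []) :
    (PySem.Dict.counter t).values ≠ [] := by
  intro hv
  have hkeys : (PySem.Dict.counter t).keys = [] := by
    have hlen : (PySem.Dict.counter t).keys.length = (PySem.Dict.counter t).values.length := by
      simp [PySem.Dict.keys, PySem.Dict.values]
    rw [hv] at hlen
    exact List.length_eq_zero_iff.mp hlen
  cases t with
  | nil => exact h rfl
  | cons a t' =>
    have : a ∈ (PySem.Dict.counter (a :: t')).keys := by
      rw [PySem.Dict.keys_counter, PySem.Set.mem_ofList]; simp
    rw [hkeys] at this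
    simp at this

-- A equals the greedy scan of the descending-sorted count list
theorem solution_eq_scan (k : Int) (t : List Int) (mx : Int)
    (hmx : PySem.List.max? (PySem.Dict.counter t).values (fun x => x) = some mx) :
    solution k t =
      scanCover k 0 0 (PySem.List.sorted (PySem.Dict.counter t).values (fun x => x) true) := by
  set cs := (PySem.Dict.counter t).values with hcs
  set s := PySem.List.sorted cs (fun x => x) true with hs
  have hperm : s.Perm cs := PySem.List.sorted_perm cs (fun x => x) true
  have hcs_ne : cs ≠ [] := by
    intro h
    rw [(PySem.List.max?_eq_none_iff cs (fun x => x)).mpr h] at hmx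
    simp at hmx
  have hs_ne : s ≠ [] := by
    intro h
    rw [hs, PySem.List.sorted_eq_nil_iff] at h
    exact hcs_ne h
  obtain ⟨s0, s', hs_cons⟩ := List.exists_cons_of_ne_nil hs_ne
  have hs0_mem : s0 ∈ cs := hperm.mem_iff.mp (by rw [hs_cons]; simp)
  have hs0_ub : ∀ y ∈ cs, y ≤ s0 := by
    have := PySem.List.key_head_sorted_rev_ge (xs := cs) (key := fun x => x) (m := s0) (t := s')
      (by rw [← hs, hs_cons])
    exact this
  have hs0_eq : s0 = mx := by
    have h1 : s0 ≤ mx := PySem.List.max?_isMax hmx s0 hs0_mem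
    have h2 : mx ≤ s0 := hs0_ub mx (PySem.List.max?_mem hmx)
    omega
  have hpos : ∀ x ∈ cs, 1 ≤ x := values_counter_pos t
  show (match PySem.List.max? cs (fun x => x) with
    | none => 0
    | some mx =>
      if k ≤ mx then 1
      else if cs.sum = k then (cs.length : Int)
      else solAGo k s (PySem.List.pyGetD s 0 0) (PySem.List.pyRange 1 (s.length : Int))) =
    scanCover k 0 0 s
  rw [hmx]
  dsimp only
  by_cases h1 : k ≤ mx
  · rw [if_pos h1, hs_cons]
    simp only [scanCover]
    rw [if_pos (by omega)]
    omega
  · rw [if_neg h1]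
    by_cases h2 : cs.sum = k
    · rw [if_pos h2]
      have := scan_all k s 0 0 hs_ne
        (fun x hx => hpos x (hperm.mem_iff.mp hx))
        (by rw [hperm.sum_eq, h2]; ring)
      rw [this, hperm.length_eq]
      ring
    · rw [if_neg h2]
      have hlen : 1 ≤ s.length := by
        rw [hs_cons]; simp
      have hA := solAGo_eq_scan k s (s.length - 1) 1 (PySem.List.pyGetD s 0 0) (by omega)
      have hget : PySem.List.pyGetD s 0 0 = s0 := by
        rw [hs_cons, show (0 : Int) = ((0 : Nat) : Int) by norm_cast, PySem.List.pyGetD_natCast]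
        rfl
      have hdrop : s.drop 1 = s' := by rw [hs_cons]; rfl
      rw [show ((1 : Nat) : Int) = (1 : Int) by norm_cast] at hA
      rw [hA, hget, hdrop, hs_cons]
      simp only [scanCover]
      rw [if_neg (by omega)]
      norm_num

-- B equals the same greedy scan
theorem solution_alt_eq_scan (k : Int) (t : List Int) (mx : Int)
    (hmx : PySem.List.max? (PySem.Dict.counter t).values (fun x => x) = some mx) :
    solution_alt k t =
      scanCover k 0 0 (PySem.List.sorted (PySem.Dict.counter t).values (fun x => x) true) := by
  set cs := (PySem.Dict.counter t).values with hcs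
  have hpos : ∀ x ∈ cs, 1 ≤ x := values_counter_pos t
  have hub : ∀ x ∈ cs, x ≤ mx := PySem.List.max?_isMax hmx
  show (match PySem.List.max? cs (fun x => x) with
    | none => 0
    | some m => altOuter k (PySem.Dict.counter cs) (PySem.List.pyRange m 0 (-1)) 0 0) =
    scanCover k 0 0 (PySem.List.sorted cs (fun x => x) true)
  rw [hmx]
  dsimp only
  rw [altOuter_eq_scan]
  have hfun : (fun c => List.replicate ((PySem.Dict.counter cs).getD c 0).toNat c) =
      (fun c : Int => List.replicate (cs.count c) c) := by
    funext c
    rw [PySem.Dict.getD_counter]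
    simp
  rw [hfun]
  rw [sorted_desc_eq cs _ (T_perm cs mx hub hpos) (T_pairwise cs mx)]

-- ===== VERDICT (by name: the statement is the Claim_ definition above) =====
theorem solution_spec : Claim_equal_solution := by
  intro k t _ hpre
  unfold Spec_solution
  obtain ⟨hne, _⟩ := hpre
  have hvne : (PySem.Dict.counter t).values ≠ [] := values_counter_ne_nil t hne
  rcases hmx : PySem.List.max? (PySem.Dict.counter t).values (fun x => x) with _ | mx
  · exact absurd ((PySem.List.max?_eq_none_iff _ _).mp hmx) hvne
  · rw [solution_eq_scan k t mx hmx, solution_alt_eq_scan k t mx hmx]
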